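-- pv_equiv track=rewrite | github.com/Max-Jacobi/tabulatedEOS | tabulatedEOS/EOS.py | _convert_args_to_kwargs
-- ===== SOURCE A (Python) =====
-- from typing import Callable, Optional, TYPE_CHECKING, Any
--
-- def _convert_args_to_kwargs(
--     args: tuple["ND", ...],
--     kwargs: dict[str, Any],
--     arguments: list[str],
-- ) -> dict[str, "ND"]:
--     kwargs = kwargs.copy()
--     args_list = list(args)
--     for argument in arguments:
--         if argument in kwargs:
--             continue
--         kwargs[argument] = args_list.pop(0)
--     if args_list:
--         raise ValueError("Too many arguments")
--     return kwargs
-- ===== SOURCE B (Python) =====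
-- def _convert_args_to_kwargs(args, kwargs, arguments):
--     # two-pass: first compute which argument names still need positional
--     # values, then check the count once and assign via zip
--     seen = set(kwargs)
--     needed = []
--     for name in arguments:
--         if name not in seen:
--             needed.append(name)
--             seen.add(name)
--     if len(args) != len(needed):
--         raise ValueError(
--             f"expected {len(needed)} positional arguments, got {len(args)}"
--         )
--     result = dict(kwargs)
--     for name, val in zip(needed, args):
--         result[name] = val
--     return result
-- ===== Notes on version B (the rewrite author's own statement) =====
-- stated objective: alternative
-- what changed: Replaces A's interleaved loop that pops each positional value off a mutable copy of args with pop(0) by a two-pass shape: first build the worklist of argument names still needing values (dedup against a seen set seeded from kwargs), then check the count once and assign with zip; Pre_ excludes exactly the inputs on which A raises (too few or too many positional args), where B raises a single ValueError instead.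
import Mathlib
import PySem

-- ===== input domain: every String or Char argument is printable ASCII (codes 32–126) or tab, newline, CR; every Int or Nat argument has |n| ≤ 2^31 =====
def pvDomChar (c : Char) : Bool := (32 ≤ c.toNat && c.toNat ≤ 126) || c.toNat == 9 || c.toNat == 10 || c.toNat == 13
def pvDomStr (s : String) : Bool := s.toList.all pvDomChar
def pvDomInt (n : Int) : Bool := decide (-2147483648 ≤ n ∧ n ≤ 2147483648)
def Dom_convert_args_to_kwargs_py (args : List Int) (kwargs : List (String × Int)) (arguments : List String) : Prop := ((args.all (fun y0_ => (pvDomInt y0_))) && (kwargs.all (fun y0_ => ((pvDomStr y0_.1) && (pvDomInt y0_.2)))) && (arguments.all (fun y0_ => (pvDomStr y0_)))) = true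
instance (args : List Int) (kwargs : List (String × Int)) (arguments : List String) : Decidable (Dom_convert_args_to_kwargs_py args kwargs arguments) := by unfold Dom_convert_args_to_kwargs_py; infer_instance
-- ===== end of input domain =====

-- B replaces A's interleaved consume-as-you-go pop loop by a two-pass shape
-- (build the worklist of names still needing values, then assign by zip);
-- objective: alternative decomposition, same cost.

-- ===== PORT A =====
-- the for-loop of A: state is (kwargs-dict, args_list); 'args_list.pop(0)' on an
-- empty list raises IndexError in Python — that input is excluded by Pre_ below,
-- the port just leaves the state unchanged there.
def aLoop (arguments : List String) (d : PySem.Dict String Int) (as_ : List Int) :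
    PySem.Dict String Int × List Int :=
  match arguments with
  | [] => (d, as_)
  | arg :: rest =>
    if d.contains arg then aLoop rest d as_
    else
      match as_ with
      | [] => (d, as_)                    -- Python: IndexError (outside Pre_)
      | a :: tl => aLoop rest (d.insert arg a) tl

def convert_args_to_kwargs_py (args : List Int) (kwargs : List (String × Int)) (arguments : List String) : List (String × Int) :=
  -- 'if args_list: raise ValueError' — raising inputs are excluded by Pre_
  (aLoop arguments (PySem.Dict.ofList kwargs) args).1.items

-- ===== PORT B =====
-- first pass of B: collect the names not yet seen, in order
def bNeeded (arguments : List String) (seen : PySem.Set String) (needed : List String) : List String :=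
  match arguments with
  | [] => needed
  | name :: rest =>
    if seen.contains name then bNeeded rest seen needed
    else bNeeded rest (seen.add name) (needed ++ [name])

def convert_args_to_kwargs_py_alt (args : List Int) (kwargs : List (String × Int)) (arguments : List String) : List (String × Int) :=
  let d := PySem.Dict.ofList kwargs
  let needed := bNeeded arguments (PySem.Set.ofList d.keys) []
  if args.length ≠ needed.length then
    d.items                               -- Python B: ValueError (outside Pre_)
  else
    ((needed.zip args).foldl (fun r p => r.insert p.1 p.2) d).items

-- ===== PRECONDITION & SPEC =====
-- Pre_ excludes exactly the inputs on which A raises (IndexError from pop(0) /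
-- ValueError "Too many arguments"): the number of positional args must equal the
-- number of distinct argument names not already given as keywords.
def Pre_convert_args_to_kwargs_py (args : List Int) (kwargs : List (String × Int)) (arguments : List String) : Prop :=
  args.length = ((PySem.List.dedup arguments).filter
      (fun n => !((kwargs.map Prod.fst).contains n))).length

instance (args : List Int) (kwargs : List (String × Int)) (arguments : List String) : Decidable (Pre_convert_args_to_kwargs_py args kwargs arguments) := by
  unfold Pre_convert_args_to_kwargs_py; infer_instance

def pvWitness_convert_args_to_kwargs_py : List Int × (List (String × Int)) × List String :=
  ([7, 8], [("b", 1)], ["a", "b", "c", "a"])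

def Spec_convert_args_to_kwargs_py (args : List Int) (kwargs : List (String × Int)) (arguments : List String) (out : List (String × Int)) : Prop := out = convert_args_to_kwargs_py_alt args kwargs arguments
instance (args : List Int) (kwargs : List (String × Int)) (arguments : List String) (out : List (String × Int)) : Decidable (Spec_convert_args_to_kwargs_py args kwargs arguments out) := by unfold Spec_convert_args_to_kwargs_py; infer_instance

-- ===== CLAIM (what is proved, stated in full; the proofs are below) =====
def Claim_equal_convert_args_to_kwargs_py : Prop := ∀ (args : List Int) (kwargs : List (String × Int)) (arguments : List String), Dom_convert_args_to_kwargs_py args kwargs arguments → Pre_convert_args_to_kwargs_py args kwargs arguments → Spec_convert_args_to_kwargs_py args kwargs arguments (convert_args_to_kwargs_py args kwargs arguments)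


-- ===== LEMMAS AND PROOFS =====

-- Boolean membership of Set.add
theorem contains_add_set (s : PySem.Set String) (x y : String) :
    (PySem.Set.add s x).contains y = (s.contains y || y == x) := by
  by_cases h : x ∈ s
  · rw [PySem.Set.add_of_mem h]
    by_cases hy : y = x
    · subst hy; simp [h]
    · simp [hy]
  · rw [PySem.Set.add_of_not_mem h]
    by_cases hy : y = x
    · subst hy; simp
    · simp [hy]

-- bNeeded's accumulator appends on the right
theorem bNeeded_acc (arguments : List String) (seen : PySem.Set String) (needed : List String) :
    bNeeded arguments seen needed = needed ++ bNeeded arguments seen [] := by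
  induction arguments generalizing seen needed with
  | nil => simp [bNeeded]
  | cons n rest ih =>
    by_cases h : seen.contains n
    · simp only [bNeeded, h, if_pos]
      exact ih seen needed
    · simp only [bNeeded, h, Bool.false_eq_true, if_neg, not_false_iff, List.nil_append]
      rw [ih (seen.add n) (needed ++ [n]), ih (seen.add n) [n]]
      simp

-- bNeeded is the first-occurrence dedup of arguments with seen names filtered out
theorem bNeeded_eq_filter_dedup (arguments : List String) (seen : PySem.Set String) :
    bNeeded arguments seen [] =
      (PySem.List.dedup arguments).filter (fun n => !(seen.contains n)) := by
  induction arguments generalizing seen with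
  | nil => simp [bNeeded]
  | cons n rest ih =>
    have hded : PySem.List.dedup (n :: rest)
        = n :: PySem.Set.discard (PySem.List.dedup rest) n := by
      simp [PySem.Set.ofList_cons]
    have hdis : PySem.Set.discard (PySem.List.dedup rest) n
        = (PySem.List.dedup rest).filter (fun y => !(y == n)) := by
      simp [PySem.Set.discard]
    rw [hded]
    by_cases h : seen.contains n
    · have hmem : n ∈ seen := by simpa using h
      simp only [bNeeded, h, if_pos]
      rw [ih seen, hdis, List.filter_cons, List.filter_filter, h]
      simp only [Bool.not_true, Bool.false_eq_true, if_neg, not_false_iff]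
      apply List.filter_congr
      intro a _
      by_cases ha : a = n
      · subst ha; simp [hmem]
      · simp [ha]
    · have hmem : n ∉ seen := by simpa using h
      have hsf : seen.contains n = false := by simpa using h
      simp only [bNeeded, h, Bool.false_eq_true, if_neg, not_false_iff, List.nil_append]
      rw [bNeeded_acc, ih (seen.add n), hdis, List.filter_cons, List.filter_filter, hsf]
      simp only [Bool.not_false, if_pos, List.singleton_append]
      congr 1
      apply List.filter_congr
      intro a _
      rw [contains_add_set]
      by_cases ha : a = n
      · subst ha; simp
      · simp

-- core: A's interleaved loop equals fold-insert over B's worklist zipped with args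
theorem aLoop_eq_fold (arguments : List String) (d : PySem.Dict String Int)
    (as_ : List Int) (seen : PySem.Set String)
    (hseen : ∀ n, seen.contains n = d.contains n)
    (hlen : (bNeeded arguments seen []).length ≤ as_.length) :
    (aLoop arguments d as_).1 =
      ((bNeeded arguments seen []).zip as_).foldl (fun r p => r.insert p.1 p.2) d := by
  induction arguments generalizing d as_ seen with
  | nil => simp [aLoop, bNeeded]
  | cons arg rest ih =>
    by_cases h : d.contains arg
    · have hs : seen.contains arg = true := by rw [hseen]; exact h
      simp only [bNeeded, hs, if_pos] at hlen ⊢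
      simp only [aLoop, h, if_pos]
      exact ih d as_ seen hseen hlen
    · have hs : seen.contains arg = false := by rw [hseen]; simpa using h
      have hb : bNeeded (arg :: rest) seen []
          = arg :: bNeeded rest (seen.add arg) [] := by
        simp only [bNeeded, hs, Bool.false_eq_true, if_neg, not_false_iff, List.nil_append]
        rw [bNeeded_acc]; rfl
      rw [hb] at hlen ⊢
      match as_ with
      | [] => exact absurd hlen (by simp)
      | a :: tl =>
        simp only [aLoop, h, Bool.false_eq_true, if_neg, not_false_iff]
        simp only [List.zip_cons_cons, List.foldl_cons]
        apply ih (d.insert arg a) tl (seen.add arg)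
        · intro n
          rw [contains_add_set, hseen, PySem.Dict.contains_insert, Bool.or_comm]
        · simpa using hlen

-- ===== VERDICT (by name: the statement is the Claim_ definition above) =====
theorem convert_args_to_kwargs_py_spec : Claim_equal_convert_args_to_kwargs_py := by
  intro args kwargs arguments _ hpre
  unfold Spec_convert_args_to_kwargs_py
  unfold convert_args_to_kwargs_py convert_args_to_kwargs_py_alt
  set d := PySem.Dict.ofList kwargs with hd
  have hkeys : ∀ n, (PySem.Set.ofList d.keys).contains n = d.contains n := by
    intro n
    cases hc : d.contains n <;>
      simp [PySem.Set.mem_ofList, ← PySem.Dict.contains_iff_mem_keys, hc]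
  have hmemkeys : ∀ n, n ∈ d.keys ↔ n ∈ kwargs.map Prod.fst := by
    intro n
    have hk : d.keys = PySem.Set.update (PySem.Dict.empty : PySem.Dict String Int).keys (kwargs.map Prod.fst) := by
      rw [hd]
      show (kwargs.foldl (fun r p => r.insert p.1 p.2) PySem.Dict.empty).keys = _
      apply PySem.Dict.keys_foldl_insert_key
    rw [hk]
    simp [PySem.Set.mem_update, PySem.Dict.keys_empty]
  have hlen : args.length = (bNeeded arguments (PySem.Set.ofList d.keys) []).length := by
    rw [bNeeded_eq_filter_dedup]
    unfold Pre_convert_args_to_kwargs_py at hpre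
    rw [hpre]
    congr 1
    apply List.filter_congr
    intro a _
    cases hc : (kwargs.map Prod.fst).contains a
    · simp only [List.contains_eq_mem, decide_eq_false_iff_not] at hc
      simp [PySem.Set.mem_ofList, hmemkeys, hc]
    · simp only [List.contains_eq_mem, decide_eq_true_eq] at hc
      simp [PySem.Set.mem_ofList, hmemkeys, hc]
  rw [if_neg (by omega)]
  congr 1
  exact aLoop_eq_fold arguments d args (PySem.Set.ofList d.keys) hkeys (le_of_eq hlen.symm)
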